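-- pv_equiv track=rewrite | github.com/Anugra07/bull | backend/app/services/ecosystem.py | classify_ecosystem
-- ===== SOURCE A (Python) =====
-- ECOSYSTEM_TYPES = {
--     "Forest": [10, 95],  # Tree cover, Mangroves
--     "Cropland": [40],
--     "Grassland": [30],
--     "Wetland": [90, 95, 80],  # Herbaceous wetland, Mangroves, Permanent water bodies
--     "Shrubland": [20],
--     "Plantation": [10],  # Tree cover - plantations are a subset but treated as forest
--     "Degraded": [60],  # Bare / sparse vegetation
--     "Other": [50, 70, 100]  # Built-up, Snow/ice, Moss
-- }
--
-- def classify_ecosystem(land_cover_class: int) -> str: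
--     """
--     Classify ecosystem type based on ESA WorldCover land cover class.
--
--     Args:
--         land_cover_class: ESA WorldCover class code (10, 20, 30, etc.)
--
--     Returns:
--         Ecosystem type string: "Forest", "Mangrove", "Cropland", "Grassland", "Wetland",
--                                "Shrubland", "Plantation", "Degraded", or "Other"
--     """
--     for ecosystem_type, classes in ECOSYSTEM_TYPES.items():
--         if land_cover_class in classes:
--             # Special handling: Mangroves (95)
--             if land_cover_class == 95:
--                 return "Mangrove"
--             if ecosystem_type != "Other":  # Don't return "Other" unless no match
--                 return ecosystem_type
--
--     return "Other"
-- ===== SOURCE B (Python) =====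
-- CLASS_TO_ECOSYSTEM = {
--     10: "Forest",
--     95: "Mangrove",
--     40: "Cropland",
--     30: "Grassland",
--     90: "Wetland",
--     80: "Wetland",
--     20: "Shrubland",
--     60: "Degraded",
--     50: "Other",
--     70: "Other",
--     100: "Other",
-- }
--
-- def classify_ecosystem(land_cover_class: int) -> str:
--     return CLASS_TO_ECOSYSTEM.get(land_cover_class, "Other")
-- ===== Notes on version B (the rewrite author's own statement) =====
-- stated objective: idiomatic
-- what changed: Replaces the priority-ordered scan over category->codes lists (with membership tests and special-casing) by one precomputed flat code->ecosystem dict and a single .get lookup with default "Other".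
import Mathlib
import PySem

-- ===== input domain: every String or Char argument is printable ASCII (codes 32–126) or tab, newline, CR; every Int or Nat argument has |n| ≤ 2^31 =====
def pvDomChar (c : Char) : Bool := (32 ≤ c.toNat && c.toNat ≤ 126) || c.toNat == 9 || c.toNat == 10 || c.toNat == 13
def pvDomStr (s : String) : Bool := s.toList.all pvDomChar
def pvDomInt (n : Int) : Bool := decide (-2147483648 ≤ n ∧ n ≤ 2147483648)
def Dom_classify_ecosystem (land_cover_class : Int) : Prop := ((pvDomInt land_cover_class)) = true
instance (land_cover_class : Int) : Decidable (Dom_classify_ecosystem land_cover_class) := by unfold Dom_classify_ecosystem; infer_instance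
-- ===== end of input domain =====

-- Header: B replaces A's priority-ordered scan over category->codes lists by a
-- precomputed flat code->ecosystem dict and a single lookup (idiomatic rewrite).


-- ===== PORT A =====
-- ECOSYSTEM_TYPES dict: insertion-ordered list of (ecosystem_type, classes)
def ECOSYSTEM_TYPES : List (String × List Int) :=
  [("Forest", [10, 95]), ("Cropland", [40]), ("Grassland", [30]),
   ("Wetland", [90, 95, 80]), ("Shrubland", [20]), ("Plantation", [10]),
   ("Degraded", [60]), ("Other", [50, 70, 100])]

-- the for-loop with early returns, as structural recursion over the items
def ecoLoop (items : List (String × List Int)) (n : Int) : String :=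
  match items with
  | [] => "Other"
  | (ecosystem_type, classes) :: rest =>
      if classes.contains n then
        if n == 95 then "Mangrove"
        else if ecosystem_type != "Other" then ecosystem_type
        else ecoLoop rest n
      else ecoLoop rest n

def classify_ecosystem (land_cover_class : Int) : String :=
  ecoLoop ECOSYSTEM_TYPES land_cover_class

-- ===== PORT B =====
def CLASS_TO_ECOSYSTEM : PySem.Dict Int String :=
  PySem.Dict.ofList
    [(10, "Forest"), (95, "Mangrove"), (40, "Cropland"), (30, "Grassland"),
     (90, "Wetland"), (80, "Wetland"), (20, "Shrubland"), (60, "Degraded"),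
     (50, "Other"), (70, "Other"), (100, "Other")]

def classify_ecosystem_alt (land_cover_class : Int) : String :=
  PySem.Dict.getD CLASS_TO_ECOSYSTEM land_cover_class "Other"

-- ===== PRECONDITION & SPEC =====
def Spec_classify_ecosystem (land_cover_class : Int) (out : String) : Prop := out = classify_ecosystem_alt land_cover_class
instance (land_cover_class : Int) (out : String) : Decidable (Spec_classify_ecosystem land_cover_class out) := by unfold Spec_classify_ecosystem; infer_instance

-- ===== CLAIM (what is proved, stated in full; the proofs are below) =====
def Claim_equal_classify_ecosystem : Prop := ∀ (land_cover_class : Int), Dom_classify_ecosystem land_cover_class → Spec_classify_ecosystem land_cover_class (classify_ecosystem land_cover_class)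

-- ===== LEMMAS AND PROOFS =====
-- Both sides are determined by which (if any) of the eleven known codes n equals;
-- case on each literal code, then both programs evaluate on closed terms.
theorem classify_eq (n : Int) :
    classify_ecosystem n = classify_ecosystem_alt n := by
  by_cases h10 : n = 10; · subst h10; decide
  by_cases h95 : n = 95; · subst h95; decide
  by_cases h40 : n = 40; · subst h40; decide
  by_cases h30 : n = 30; · subst h30; decide
  by_cases h90 : n = 90; · subst h90; decide
  by_cases h80 : n = 80; · subst h80; decide
  by_cases h20 : n = 20; · subst h20; decide
  by_cases h60 : n = 60; · subst h60; decide
  by_cases h50 : n = 50; · subst h50; decide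
  by_cases h70 : n = 70; · subst h70; decide
  by_cases h100 : n = 100; · subst h100; decide
  have hmk : CLASS_TO_ECOSYSTEM = PySem.Dict.mk
      [(10, "Forest"), (95, "Mangrove"), (40, "Cropland"), (30, "Grassland"),
       (90, "Wetland"), (80, "Wetland"), (20, "Shrubland"), (60, "Degraded"),
       (50, "Other"), (70, "Other"), (100, "Other")] := by decide
  have hA : classify_ecosystem n = "Other" := by
    simp [classify_ecosystem, ecoLoop, ECOSYSTEM_TYPES,
          h10, h95, h40, h30, h90, h80, h20, h60, h50, h70, h100]
  have hB : classify_ecosystem_alt n = "Other" := by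
    simp [classify_ecosystem_alt, hmk, PySem.Dict.getD,  
          PySem.Dict.get?, beq_iff_eq, Ne.symm h10, Ne.symm h95, Ne.symm h40,
          Ne.symm h30, Ne.symm h90, Ne.symm h80, Ne.symm h20, Ne.symm h60,
          Ne.symm h50, Ne.symm h70, Ne.symm h100]
  rw [hA, hB]

-- ===== VERDICT (by name: the statement is the Claim_ definition above) =====
theorem classify_ecosystem_spec : Claim_equal_classify_ecosystem := by
  intro n _
  exact classify_eq n
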